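-- pv_equiv track=rewrite | github.com/robinbenitezmora/Python-Practice | Intermediate/maze_runner_3d.py | wallDictToWallStr
-- ===== SOURCE A (Python) =====
-- EMPTY = ' '
--
-- def wallDictToWallStr(wallDict):
--     maxX = max([x for x, y in wallDict])
--     maxY = max([y for x, y in wallDict])
--     wallStr = ''
--     for y in range(maxY + 1):
--         for x in range(maxX + 1):
--             wallStr += wallDict.get((x, y), EMPTY)
--         wallStr += '\n'
--     return wallStr
-- ===== SOURCE B (Python) =====
-- EMPTY = ' '
--
-- def wallDictToWallStr(wallDict):
--     # Scatter instead of gather: build a mutable grid once, place each wall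
--     # entry directly, then join the rows.  A instead scans every cell doing
--     # a dict lookup.
--     maxX = max([x for x, y in wallDict])
--     maxY = max([y for x, y in wallDict])
--     grid = [[EMPTY] * (maxX + 1) for _ in range(maxY + 1)]
--     for (x, y), v in wallDict.items():
--         if 0 <= x <= maxX and 0 <= y <= maxY:
--             grid[y][x] = v
--     return ''.join(''.join(row) + '\n' for row in grid)
-- ===== Notes on version B (the rewrite author's own statement) =====
-- stated objective: alternative
-- what changed: A gathers: for every grid cell it does a dict lookup; B scatters: it allocates the grid once, writes only the dict's entries into it, then joins the rows. Pre_ excludes the empty dict (max() raises ValueError in both A and B) and, in the Lean association-list representation only, duplicate keys (a Python dict cannot contain them, so first-match vs last-write there is unspecifiable).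
import Mathlib
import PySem

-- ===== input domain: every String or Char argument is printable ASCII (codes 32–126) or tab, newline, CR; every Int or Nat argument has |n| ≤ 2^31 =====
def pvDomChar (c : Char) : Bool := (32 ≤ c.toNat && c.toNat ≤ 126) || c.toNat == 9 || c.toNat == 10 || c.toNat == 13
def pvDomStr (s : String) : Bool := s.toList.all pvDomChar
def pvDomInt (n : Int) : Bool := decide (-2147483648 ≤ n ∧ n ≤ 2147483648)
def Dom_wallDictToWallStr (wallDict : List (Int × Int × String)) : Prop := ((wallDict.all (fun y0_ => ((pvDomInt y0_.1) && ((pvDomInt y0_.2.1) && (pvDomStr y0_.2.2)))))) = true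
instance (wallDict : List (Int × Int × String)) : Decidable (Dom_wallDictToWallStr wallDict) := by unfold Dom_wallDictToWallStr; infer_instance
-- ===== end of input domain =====

-- B scatters the dict's entries into a pre-allocated grid instead of A's per-cell
-- dict lookups; return values proved equal on non-empty dicts (the association-list
-- inputs with duplicate keys, which no Python dict can denote, are outside Pre_).


-- ===== PORT A =====
-- EMPTY = ' '
def pvEMPTY : String := " "

-- wallDict.get((x, y), EMPTY): first match in insertion order (assoc-list dict).
def pvDictGet (wallDict : List (Int × Int × String)) (x y : Int) : String :=
  match wallDict with
  | [] => pvEMPTY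
  | p :: t => if p.1 = x ∧ p.2.1 = y then p.2.2 else pvDictGet t x y

def wallDictToWallStr (wallDict : List (Int × Int × String)) : String :=
  match PySem.List.max? (wallDict.map (fun p => p.1)) (fun v => v),
        PySem.List.max? (wallDict.map (fun p => p.2.1)) (fun v => v) with
  | some maxX, some maxY =>
      (PySem.List.pyRange 0 (maxY + 1) 1).foldl
        (fun wallStr y =>
          ((PySem.List.pyRange 0 (maxX + 1) 1).foldl
            (fun s x => s ++ pvDictGet wallDict x y) wallStr) ++ "\n")
        ""
  | _, _ => ""  -- unreachable: on the empty dict max() raises ValueError, excluded by Pre_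

-- ===== PORT B =====
-- ''.join(parts)
def pvConcat (parts : List String) : String := parts.foldl (· ++ ·) ""

def wallDictToWallStr_alt (wallDict : List (Int × Int × String)) : String :=
  match PySem.List.max? (wallDict.map (fun p => p.1)) (fun v => v) with
  | none => ""  -- unreachable under Pre_ (empty dict): max() raises ValueError
  | some maxX =>
    match PySem.List.max? (wallDict.map (fun p => p.2.1)) (fun v => v) with
    | none => ""
    | some maxY =>
          -- grid = [[EMPTY] * (maxX + 1) for _ in range(maxY + 1)]
          let grid0 : List (List String) :=
            List.replicate (maxY + 1).toNat (List.replicate (maxX + 1).toNat " ")  -- EMPTY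
          -- for (x, y), v in wallDict.items(): if in bounds: grid[y][x] = v
          -- (.toNat is exact here: the guard gives 0 ≤ x and 0 ≤ y)
          let grid := wallDict.foldl
            (fun g p =>
              if 0 ≤ p.1 ∧ p.1 ≤ maxX ∧ 0 ≤ p.2.1 ∧ p.2.1 ≤ maxY then
                g.modify p.2.1.toNat (fun row => row.set p.1.toNat p.2.2)
              else g) grid0
          pvConcat (grid.map (fun row => pvConcat row ++ "\n"))

-- ===== PRECONDITION & SPEC =====
-- Pre_ excludes (1) the empty dict, on which A (and B) raises ValueError via max(),
-- and (2) association lists with duplicate (x, y) keys: a Python dict cannot contain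
-- them, so the first-match/last-write choice there is an artefact of the list encoding.
def Pre_wallDictToWallStr (wallDict : List (Int × Int × String)) : Prop :=
  wallDict ≠ [] ∧ (wallDict.map (fun p => (p.1, p.2.1))).Nodup

instance (wallDict : List (Int × Int × String)) : Decidable (Pre_wallDictToWallStr wallDict) := by
  unfold Pre_wallDictToWallStr; infer_instance

def pvWitness_wallDictToWallStr : (List (Int × Int × String)) := [(0, 0, "#"), (1, 1, "#")]

def Spec_wallDictToWallStr (wallDict : List (Int × Int × String)) (out : String) : Prop := out = wallDictToWallStr_alt wallDict
instance (wallDict : List (Int × Int × String)) (out : String) : Decidable (Spec_wallDictToWallStr wallDict out) := by unfold Spec_wallDictToWallStr; infer_instance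

-- ===== CLAIM (what is proved, stated in full; the proofs are below) =====
def Claim_equal_wallDictToWallStr : Prop := ∀ (wallDict : List (Int × Int × String)), Dom_wallDictToWallStr wallDict → Pre_wallDictToWallStr wallDict → Spec_wallDictToWallStr wallDict (wallDictToWallStr wallDict)

-- ===== LEMMAS AND PROOFS =====

theorem pv_foldl_append_str (l : List String) :
    ∀ init : String, l.foldl (· ++ ·) init = init ++ l.foldl (· ++ ·) "" := by
  induction l with
  | nil => intro init; simp [String.append_empty]
  | cons a t ih =>
      intro init
      simp only [List.foldl_cons]
      rw [ih (init ++ a), ih ("" ++ a), String.empty_append, String.append_assoc]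

theorem pvConcat_cons (a : String) (t : List String) :
    pvConcat (a :: t) = a ++ pvConcat t := by
  simp only [pvConcat, List.foldl_cons]
  rw [pv_foldl_append_str t ("" ++ a), String.empty_append]

-- 'acc += f(x)' loop = acc ++ ''.join(map f ...)
theorem pv_foldl_concat {α : Type} (l : List α) (f : α → String) :
    ∀ init : String, l.foldl (fun s a => s ++ f a) init = init ++ pvConcat (l.map f) := by
  induction l with
  | nil => intro init; simp [pvConcat, String.append_empty]
  | cons a t ih =>
      intro init
      simp only [List.foldl_cons, List.map_cons]
      rw [ih, pvConcat_cons, String.append_assoc]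

-- the LAST entry of l with key (x, y), if any (B overwrites in list order)
def pvLastHit : List (Int × Int × String) → Int → Int → Option String
  | [], _, _ => none
  | p :: t, x, y =>
      match pvLastHit t x y with
      | some v => some v
      | none => if p.1 = x ∧ p.2.1 = y then some p.2.2 else none

theorem pvLastHit_none (t : List (Int × Int × String)) (x y : Int)
    (h : ∀ q ∈ t, ¬(q.1 = x ∧ q.2.1 = y)) : pvLastHit t x y = none := by
  induction t with
  | nil => rfl
  | cons q t ih =>
      simp only [pvLastHit]
      rw [ih (fun r hr => h r (List.mem_cons_of_mem q hr))]
      simp [h q (List.mem_cons_self ..)]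

-- with distinct keys, last match = first match = dict.get
theorem pvLastHit_eq_get (l : List (Int × Int × String))
    (h : (l.map (fun p => (p.1, p.2.1))).Nodup) (x y : Int) :
    (pvLastHit l x y).getD pvEMPTY = pvDictGet l x y := by
  induction l with
  | nil => rfl
  | cons p t ih =>
      simp only [List.map_cons, List.nodup_cons] at h
      obtain ⟨hnm, hnd⟩ := h
      by_cases hm : p.1 = x ∧ p.2.1 = y
      · have hnone : pvLastHit t x y = none := by
          apply pvLastHit_none
          intro q hq hqm
          have hmem : (q.1, q.2.1) ∈ List.map (fun p => (p.1, p.2.1)) t :=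
            List.mem_map_of_mem hq
          have heq : (p.1, p.2.1) = (q.1, q.2.1) := by
            rw [hm.1, hm.2, hqm.1, hqm.2]
          exact hnm (heq ▸ hmem)
        simp [pvLastHit, pvDictGet, hnone, hm]
      · have hstep : pvDictGet (p :: t) x y = pvDictGet t x y := by
          simp [pvDictGet, hm]
        rw [hstep, ← ih hnd]
        simp only [pvLastHit, if_neg hm]
        cases pvLastHit t x y <;> rfl

-- grid as a function of its (row, column) indices
def pvMkGrid (n m : Nat) (c : Nat → Nat → String) : List (List String) :=
  (List.range n).map (fun i => (List.range m).map (fun j => c i j))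

theorem pvMkGrid_const (n m : Nat) :
    List.replicate n (List.replicate m " ") = pvMkGrid n m (fun _ _ => " ") := by
  simp [pvMkGrid, List.map_const']

theorem pvMkGrid_write (n m yn xn : Nat) (v : String) (c : Nat → Nat → String) :
    (pvMkGrid n m c).modify yn (fun row => row.set xn v)
      = pvMkGrid n m (fun i j => if i = yn ∧ j = xn then v else c i j) := by
  apply List.ext_getElem
  · simp [pvMkGrid]
  · intro i h1 h2
    simp only [pvMkGrid, List.length_map, List.length_range, List.length_modify] at h1 h2 ⊢
    rw [List.getElem_modify]
    split_ifs with hy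
    · simp only [List.getElem_map, List.getElem_range]
      apply List.ext_getElem
      · simp
      · intro j hj1 hj2
        simp only [List.length_set, List.length_map, List.length_range] at hj1 hj2
        simp only [List.getElem_set, List.getElem_map, List.getElem_range]
        split_ifs <;> first | rfl | omega
    · simp only [List.getElem_map, List.getElem_range]
      apply List.map_congr_left
      intro j _
      have : ¬(i = yn ∧ j = xn) := fun h => hy h.1.symm
      simp [this]

-- main scatter invariant: B's write loop turns the grid-of-c into the grid of
-- "last matching entry, else c"
theorem pv_scatter_grid (maxX maxY : Int) (l : List (Int × Int × String)) :
    ∀ c : Nat → Nat → String,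
    l.foldl
      (fun g p =>
        if 0 ≤ p.1 ∧ p.1 ≤ maxX ∧ 0 ≤ p.2.1 ∧ p.2.1 ≤ maxY then
          g.modify p.2.1.toNat (fun row => row.set p.1.toNat p.2.2)
        else g)
      (pvMkGrid (maxY + 1).toNat (maxX + 1).toNat c)
    = pvMkGrid (maxY + 1).toNat (maxX + 1).toNat
        (fun i j => (pvLastHit l (j : Int) (i : Int)).getD (c i j)) := by
  induction l with
  | nil => intro c; rfl
  | cons p t ih =>
      intro c
      simp only [List.foldl_cons]
      by_cases hg : 0 ≤ p.1 ∧ p.1 ≤ maxX ∧ 0 ≤ p.2.1 ∧ p.2.1 ≤ maxY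
      · rw [if_pos hg, pvMkGrid_write, ih]
        apply List.map_congr_left
        intro i hi
        rw [List.mem_range] at hi
        apply List.map_congr_left
        intro j hj
        rw [List.mem_range] at hj
        simp only [pvLastHit]
        cases hlt : pvLastHit t (j : Int) (i : Int) with
        | some v => simp
        | none =>
            by_cases hm : p.1 = (j : Int) ∧ p.2.1 = (i : Int)
            · have h1 : i = p.2.1.toNat := by omega
              have h2 : j = p.1.toNat := by omega
              rw [if_pos ⟨h1, h2⟩, if_pos hm]
              rfl
            · have hn : ¬(i = p.2.1.toNat ∧ j = p.1.toNat) := by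
                intro h; exact hm ⟨by omega, by omega⟩
              rw [if_neg hn, if_neg hm]
      · rw [if_neg hg, ih]
        apply List.map_congr_left
        intro i hi
        rw [List.mem_range] at hi
        apply List.map_congr_left
        intro j hj
        rw [List.mem_range] at hj
        simp only [pvLastHit]
        cases hlt : pvLastHit t (j : Int) (i : Int) with
        | some v => simp
        | none =>
            have hm : ¬(p.1 = (j : Int) ∧ p.2.1 = (i : Int)) := by
              intro h
              apply hg
              refine ⟨by omega, by omega, by omega, by omega⟩
            simp [hm]

-- A's nested concat loops = join of joins
theorem pv_gather_str (d : List (Int × Int × String)) (maxX maxY : Int) :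
    (PySem.List.pyRange 0 (maxY + 1) 1).foldl
      (fun wallStr y =>
        ((PySem.List.pyRange 0 (maxX + 1) 1).foldl
          (fun s x => s ++ pvDictGet d x y) wallStr) ++ "\n")
      ""
    = pvConcat ((PySem.List.pyRange 0 (maxY + 1) 1).map
        (fun y => pvConcat ((PySem.List.pyRange 0 (maxX + 1) 1).map
          (fun x => pvDictGet d x y)) ++ "\n")) := by
  rw [List.foldl_ext
      (g := fun wallStr y =>
        wallStr ++ (pvConcat ((PySem.List.pyRange 0 (maxX + 1) 1).map
          (fun x => pvDictGet d x y)) ++ "\n"))]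
  · rw [pv_foldl_concat, String.empty_append]
  · intro ws y _
    rw [pv_foldl_concat, String.append_assoc]

-- ===== VERDICT (by name: the statement is the Claim_ definition above) =====
theorem wallDictToWallStr_spec : Claim_equal_wallDictToWallStr := by
  intro d _ hpre
  obtain ⟨hne, hnd⟩ := hpre
  unfold Spec_wallDictToWallStr wallDictToWallStr wallDictToWallStr_alt
  cases hX : PySem.List.max? (d.map (fun p => p.1)) (fun v => v) with
  | none =>
      -- the goal is '"" = ""'; the rw closes it
      rw [PySem.List.max?_eq_none_iff] at hX
  | some maxX =>
  cases hY : PySem.List.max? (d.map (fun p => p.2.1)) (fun v => v) with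
  | none =>
      rw [PySem.List.max?_eq_none_iff] at hY
  | some maxY =>
  dsimp only
  rw [pv_gather_str, pvMkGrid_const, pv_scatter_grid]
  simp only [pvMkGrid, List.map_map, PySem.List.pyRange_one, Function.comp_def,
    sub_zero, zero_add]
  apply congrArg
  apply List.map_congr_left
  intro i _
  apply congrArg (fun s => s ++ "\n")
  apply congrArg
  apply List.map_congr_left
  intro j _
  exact (pvLastHit_eq_get d hnd _ _).symm
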